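-- pv_equiv track=rewrite | github.com/eunhee-dev/problem-solving | 0x09. bfs/2583번. 영역 구하기/solve.py | solve
-- ===== SOURCE A (Python) =====
-- from collections import deque
--
-- DIRECTIONS = [(1, 0), (0, 1), (-1, 0), (0, -1)]
--
-- def bfs(m: int, n: int, board: list[list[int]],
--         visited: list[list[bool]], start: tuple[int, int]) -> int:
--     queue = deque([start])
--     visited[start[0]][start[1]] = True
--     area = 0
--
--     while queue:
--         x, y = queue.popleft()
--         area += 1
--         for dx, dy in DIRECTIONS:
--             nx, ny = x + dx, y + dy
--             if 0 <= nx < m and 0 <= ny < n and not visited[nx][ny] and board[nx][ny] == 1: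
--                 visited[nx][ny] = True
--                 queue.append((nx, ny))
--     return area
--
-- def solve(m: int, n: int, rect_coord: list[tuple[int, int, int, int]]) -> tuple[int, str]:
--     board = [[1] * n for _ in range(m)]
--
--     for x1, y1, x2, y2 in rect_coord:
--         for x in range(y1, y2):  # 직교 좌표계 => (행: x, 열: y)로 바꾸기
--             for y in range(x1, x2):
--                 board[x][y] = 0
--
--     visited = [[False] * n for _ in range(m)]
--     area_list = []
--
--     for x in range(m):
--         for y in range(n):
--             if board[x][y] == 1 and not visited[x][y]:
--                 area_list.append(bfs(m, n, board, visited, (x, y)))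
--
--     return len(area_list), " ".join(map(str, sorted(area_list)))
-- ===== SOURCE B (Python) =====
-- def solve(m, n, rect_coord):
--     # Difference-mark blocking + DFS stack flood fill over a coordinate set.
--     marks = [[0] * (n + 1) for _ in range(m)]
--     for x1, y1, x2, y2 in rect_coord:
--         if x1 < x2:
--             for x in range(y1, y2):
--                 marks[x][x1] += 1
--                 marks[x][x2] -= 1
--
--     cover = []
--     for x in range(m):
--         row = []
--         s = 0
--         for y in range(n):
--             s += marks[x][y]
--             row.append(s)
--         cover.append(row)
--
--     visited = set()
--     areas = []
--     for x in range(m):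
--         for y in range(n):
--             if cover[x][y] == 0 and (x, y) not in visited:
--                 areas.append(_area(m, n, cover, visited, x, y))
--
--     return len(areas), " ".join(map(str, sorted(areas)))
--
--
-- def _area(m, n, cover, visited, sx, sy):
--     visited.add((sx, sy))
--     stack = [(sx, sy)]
--     size = 0
--     while stack:
--         x, y = stack.pop()
--         size += 1
--         for c in ((x + 1, y), (x, y + 1), (x - 1, y), (x, y - 1)):
--             if 0 <= c[0] < m and 0 <= c[1] < n and c not in visited and cover[c[0]][c[1]] == 0:
--                 visited.add(c)
--                 stack.append(c)
--     return size
-- ===== Notes on version B (the rewrite author's own statement) =====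
-- stated objective: alternative
-- what changed: Rectangle blocking becomes per-row +1/-1 difference marks with a running-sum pass recovering cover counts, and the region fill becomes an iterative DFS over an explicit stack (LIFO) with a visited set of coordinate tuples, replacing A's per-cell blanking and BFS deque over a boolean matrix.
-- outside the precondition, e.g. on solve(2, 2, [(-1, -1, 0, 0)]): A returns (1, '3'), B returns (1, '2')
import Mathlib
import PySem

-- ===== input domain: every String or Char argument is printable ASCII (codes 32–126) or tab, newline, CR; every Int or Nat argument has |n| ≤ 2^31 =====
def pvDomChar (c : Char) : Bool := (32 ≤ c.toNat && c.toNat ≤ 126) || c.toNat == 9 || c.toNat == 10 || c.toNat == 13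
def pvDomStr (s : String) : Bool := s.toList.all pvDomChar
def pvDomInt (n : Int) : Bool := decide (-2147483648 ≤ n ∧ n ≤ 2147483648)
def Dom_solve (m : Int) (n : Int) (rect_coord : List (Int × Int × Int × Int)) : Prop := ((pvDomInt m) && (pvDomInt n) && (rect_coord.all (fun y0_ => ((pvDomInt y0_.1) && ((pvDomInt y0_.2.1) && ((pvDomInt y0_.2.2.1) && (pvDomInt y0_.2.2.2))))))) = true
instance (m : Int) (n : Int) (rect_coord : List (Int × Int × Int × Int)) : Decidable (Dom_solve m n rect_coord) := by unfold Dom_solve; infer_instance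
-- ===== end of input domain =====

-- B replaces A's per-cell rectangle blanking by per-row +1/-1 difference marks with a
-- running-sum pass, and A's BFS over a deque with a boolean visited matrix by an iterative
-- DFS over an explicit stack with a visited set of coordinates; objective: alternative.

-- shared 2D-list indexing primitives (Python g[x][y] read / write, via PySem)
def cellG {α : Type} (d : α) (g : List (List α)) (x y : Int) : α :=
  PySem.List.pyGetD (PySem.List.pyGetD g x []) y d

def setG {α : Type} (g : List (List α)) (x y : Int) (v : α) : List (List α) :=
  PySem.List.pySetD g x (PySem.List.pySetD (PySem.List.pyGetD g x []) y v)

-- ===== PORT A =====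
def pyDirections : List (Int × Int) := [(1, 0), (0, 1), (-1, 0), (0, -1)]

-- the 'while queue:' loop of bfs; fuel bounds the number of pops (≤ m*n + 1 in any real run)
def bfsLoop (m n : Int) (board : List (List Int)) :
    Nat → List (Int × Int) → List (List Bool) → Int → (List (List Bool) × Int)
  | 0, _, visited, area => (visited, area)
  | _ + 1, [], visited, area => (visited, area)
  | fuel + 1, (x, y) :: rest, visited, area =>
      let st := pyDirections.foldl
        (fun (st : List (List Bool) × List (Int × Int)) d =>
          let nx := x + d.1
          let ny := y + d.2
          if 0 ≤ nx ∧ nx < m ∧ 0 ≤ ny ∧ ny < n ∧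
             cellG false st.1 nx ny = false ∧ cellG 0 board nx ny = 1 then
            (setG st.1 nx ny true, st.2 ++ [(nx, ny)])
          else st) (visited, rest)
      bfsLoop m n board fuel st.2 st.1 (area + 1)

def bfsA (m n : Int) (board : List (List Int)) (visited : List (List Bool))
    (start : Int × Int) : List (List Bool) × Int :=
  bfsLoop m n board (m.toNat * n.toNat + 1) [start] (setG visited start.1 start.2 true) 0

def solve (m : Int) (n : Int) (rect_coord : List (Int × Int × Int × Int)) : Int × String :=
  let board0 := (PySem.List.pyRange 0 m 1).map (fun _ => List.replicate n.toNat (1 : Int))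
  let board := rect_coord.foldl (fun b r =>
      (PySem.List.pyRange r.2.1 r.2.2.2 1).foldl (fun b x =>
        (PySem.List.pyRange r.1 r.2.2.1 1).foldl (fun b y => setG b x y 0) b) b) board0
  let visited0 := (PySem.List.pyRange 0 m 1).map (fun _ => List.replicate n.toNat false)
  let fin := (PySem.List.pyRange 0 m 1).foldl
    (fun (st : List (List Bool) × List Int) x =>
      (PySem.List.pyRange 0 n 1).foldl (fun st y =>
        if cellG 0 board x y = 1 ∧ cellG false st.1 x y = false then
          let r := bfsA m n board st.1 (x, y)
          (r.1, st.2 ++ [r.2])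
        else st) st) (visited0, ([] : List Int))
  ((fin.2.length : Int),
   PySem.Str.join " " ((PySem.List.sorted fin.2 (fun a => a) false).map PySem.Int.toStr))

-- ===== PORT B =====
-- the 'while stack:' loop of _area: DFS, popping from the END of the stack, with a
-- visited SET of coordinate pairs; fuel bounds the number of pops, as in A's port
def areaLoop (m n : Int) (cover : List (List Int)) :
    Nat → List (Int × Int) → List (Int × Int) → Int → (List (Int × Int) × Int)
  | 0, _, visited, size => (visited, size)
  | fuel + 1, stack, visited, size =>
      match stack.getLast? with
      | none => (visited, size)
      | some c =>
        let rest := stack.dropLast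
        let st := [(c.1 + 1, c.2), (c.1, c.2 + 1), (c.1 - 1, c.2), (c.1, c.2 - 1)].foldl
          (fun (st : List (Int × Int) × List (Int × Int)) e =>
            if 0 ≤ e.1 ∧ e.1 < m ∧ 0 ≤ e.2 ∧ e.2 < n ∧ e ∉ st.1 ∧
               cellG 0 cover e.1 e.2 = 0 then
              (PySem.Set.add st.1 e, st.2 ++ [e])
            else st) (visited, rest)
        areaLoop m n cover fuel st.2 st.1 (size + 1)

def areaB (m n : Int) (cover : List (List Int)) (visited : List (Int × Int))
    (sx sy : Int) : List (Int × Int) × Int :=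
  areaLoop m n cover (m.toNat * n.toNat + 1) [(sx, sy)] (PySem.Set.add visited (sx, sy)) 0

def solve_alt (m : Int) (n : Int) (rect_coord : List (Int × Int × Int × Int)) : Int × String :=
  let marks := rect_coord.foldl (fun g r =>
      if r.1 < r.2.2.1 then
        (PySem.List.pyRange r.2.1 r.2.2.2 1).foldl (fun g x =>
          let g1 := setG g x r.1 (cellG 0 g x r.1 + 1)
          setG g1 x r.2.2.1 (cellG 0 g1 x r.2.2.1 - 1)) g
      else g)
    ((PySem.List.pyRange 0 m 1).map (fun _ => List.replicate (n + 1).toNat (0 : Int)))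
  let cover := (PySem.List.pyRange 0 m 1).foldl
    (fun (cov : List (List Int)) x =>
      let rs := (PySem.List.pyRange 0 n 1).foldl
        (fun (p : List Int × Int) y =>
          let s := p.2 + cellG 0 marks x y
          (p.1 ++ [s], s)) (([] : List Int), (0 : Int))
      cov ++ [rs.1]) []
  let fin := (PySem.List.pyRange 0 m 1).foldl
    (fun (st : List (Int × Int) × List Int) x =>
      (PySem.List.pyRange 0 n 1).foldl (fun st y =>
        if cellG 0 cover x y = 0 ∧ (x, y) ∉ st.1 then
          let r := areaB m n cover st.1 x y
          (r.1, st.2 ++ [r.2])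
        else st) st) (([] : List (Int × Int)), ([] : List Int))
  ((fin.2.length : Int),
   PySem.Str.join " " ((PySem.List.sorted fin.2 (fun a => a) false).map PySem.Int.toStr))

-- ===== PRECONDITION & SPEC =====
-- Pre_ excludes rectangles of positive extent whose coordinates leave the grid ranges
-- [0, n] x [0, m]: there out-of-range coordinates make A raise IndexError, and negative ones
-- trigger Python's negative-index wraparound, silently blanking accidental cells.
def Pre_solve (m : Int) (n : Int) (rect_coord : List (Int × Int × Int × Int)) : Prop :=
  ∀ r ∈ rect_coord, (r.1 < r.2.2.1 ∧ r.2.1 < r.2.2.2) →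
    (0 ≤ r.1 ∧ r.2.2.1 ≤ n ∧ 0 ≤ r.2.1 ∧ r.2.2.2 ≤ m)
instance (m : Int) (n : Int) (rect_coord : List (Int × Int × Int × Int)) : Decidable (Pre_solve m n rect_coord) := by unfold Pre_solve; infer_instance

def pvWitness_solve : Int × Int × (List (Int × Int × Int × Int)) := (3, 4, [(1, 1, 3, 2)])

def Spec_solve (m : Int) (n : Int) (rect_coord : List (Int × Int × Int × Int)) (out : Int × String) : Prop := out = solve_alt m n rect_coord
instance (m : Int) (n : Int) (rect_coord : List (Int × Int × Int × Int)) (out : Int × String) : Decidable (Spec_solve m n rect_coord out) := by unfold Spec_solve; infer_instance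

-- ===== CLAIM (what is proved, stated in full; the proofs are below) =====
def Claim_equal_solve : Prop := ∀ (m : Int) (n : Int) (rect_coord : List (Int × Int × Int × Int)), Dom_solve m n rect_coord → Pre_solve m n rect_coord → Spec_solve m n rect_coord (solve m n rect_coord)

-- ===== LEMMAS AND PROOFS =====
def Shape {α : Type} (g : List (List α)) (M N : Nat) : Prop :=
  g.length = M ∧ ∀ row ∈ g, row.length = N

theorem pyGetD_nonneg {α : Type} (xs : List α) (i : Int) (h : 0 ≤ i) (d : α) :
    PySem.List.pyGetD xs i d = xs.getD i.toNat d := by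
  have h2 : i = ((i.toNat : Nat) : Int) := by omega
  rw [h2, PySem.List.pyGetD_natCast]
  simp [List.getD]
  rw [max_eq_left h]

theorem getD_set' {α : Type} (xs : List α) (n m : Nat) (a d : α) :
    (xs.set n a).getD m d = if m = n ∧ n < xs.length then a else xs.getD m d := by
  simp [List.getD, List.getElem?_set]
  split_ifs <;> simp_all

theorem row_len {α : Type} {g : List (List α)} {M N : Nat} (hs : Shape g M N)
    {x : Int} (hx : 0 ≤ x) (hx' : x < (M : Int)) :
    (PySem.List.pyGetD g x []).length = N := by
  have h1 : g.length = M := hs.1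
  rw [pyGetD_nonneg _ _ hx]
  have hlt : x.toNat < g.length := by omega
  rw [List.getD_eq_getElem _ _ hlt]
  exact hs.2 _ (List.getElem_mem hlt)

theorem shape_setG {α : Type} {g : List (List α)} {M N : Nat} (hs : Shape g M N)
    (x y : Int) (v : α) (hx : 0 ≤ x) : Shape (setG g x y v) M N := by
  unfold setG
  rw [PySem.List.pySetD_of_nonneg _ _ hx]
  refine ⟨by simp [hs.1], ?_⟩
  intro row hrow
  have h1 : g.length = M := hs.1
  by_cases hlt : x.toNat < g.length
  · rcases List.mem_or_eq_of_mem_set hrow with h | h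
    · exact hs.2 _ h
    · subst h
      rw [PySem.List.length_pySetD]
      exact row_len hs hx (by omega)
  · rw [List.set_eq_of_length_le (by omega)] at hrow
    exact hs.2 _ hrow

theorem cellG_setG {α : Type} (d v : α) {g : List (List α)} {M N : Nat} (hs : Shape g M N)
    {x y : Int} (a b : Int) (hx : 0 ≤ x) (hx' : x < (M : Int)) (hy : 0 ≤ y) (hy' : y < (N : Int))
    (ha : 0 ≤ a) (hb : 0 ≤ b) :
    cellG d (setG g x y v) a b = if a = x ∧ b = y then v else cellG d g a b := by
  unfold cellG setG
  rw [PySem.List.pySetD_of_nonneg _ _ hx, pyGetD_nonneg _ _ ha, getD_set']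
  have h1 : g.length = M := hs.1
  have hxl : x.toNat < g.length := by omega
  have hrl : (PySem.List.pyGetD g x []).length = N := row_len hs hx hx'
  by_cases hax : a = x
  · subst hax
    simp only [hxl, and_true, true_and, ite_true, eq_self_iff_true]
    rw [PySem.List.pySetD_of_nonneg _ _ hy, pyGetD_nonneg _ _ hb, getD_set']
    have hyl : y.toNat < (PySem.List.pyGetD g a []).length := by omega
    by_cases hby : b = y
    · subst hby
      simp [hyl]
    · have hne : ¬ (b.toNat = y.toNat) := by omega
      simp [hne, hby, pyGetD_nonneg _ _ hb]
  · have hne : ¬ (a.toNat = x.toNat) := by omega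
    simp [hne, hax, pyGetD_nonneg _ _ ha]

theorem shape_init {α : Type} (c : α) (m : Int) (k : Nat) (hm : 0 ≤ m) :
    Shape ((PySem.List.pyRange 0 m 1).map (fun _ => List.replicate k c)) m.toNat k := by
  constructor
  · simp [PySem.List.length_pyRange_one]
  · intro row hrow
    rcases List.mem_map.1 hrow with ⟨_, _, h⟩
    simp [← h]

theorem cellG_init {α : Type} (d c : α) (m : Int) (k : Nat) (x y : Int)
    (hx : 0 ≤ x) (hx' : x < m) (hy : 0 ≤ y) (hy' : y < (k : Int)) :
    cellG d ((PySem.List.pyRange 0 m 1).map (fun _ => List.replicate k c)) x y = c := by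
  unfold cellG
  rw [PySem.List.pyGetD_map_pyRange_of_nonneg _ _ _ _ hx hx']
  rw [pyGetD_nonneg _ _ hy]
  have : y.toNat < k := by omega
  simp [List.getD, this]

theorem markColsL {M N : Nat} (x : Int) (hx : 0 ≤ x) (hx' : x < (M : Int)) :
    ∀ (L : List Int) (g : List (List Int)), Shape g M N → (∀ c ∈ L, 0 ≤ c ∧ c < (N : Int)) →
      Shape (L.foldl (fun b y => setG b x y 0) g) M N ∧
      ∀ a b : Int, 0 ≤ a → 0 ≤ b →
        cellG 0 (L.foldl (fun b y => setG b x y 0) g) a b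
          = if a = x ∧ b ∈ L then 0 else cellG 0 g a b := by
  intro L
  induction L with
  | nil => intro g hs _; exact ⟨hs, by simp⟩
  | cons c L ih =>
      intro g hs hL
      have hc := hL c (by simp)
      have hs' : Shape (setG g x c 0) M N := shape_setG hs _ _ _ hx
      obtain ⟨ihs, ihc⟩ := ih (setG g x c 0) hs' (fun e he => hL e (by simp [he]))
      refine ⟨by simpa using ihs, ?_⟩
      intro a b ha hb
      have := ihc a b ha hb
      simp only [List.foldl_cons] at *
      rw [this, cellG_setG _ _ hs a b hx hx' hc.1 hc.2 ha hb]
      by_cases h1 : a = x <;> by_cases h2 : b ∈ L <;> by_cases h3 : b = c <;>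
        simp [h1, h2, h3]

theorem markRowsL {M N : Nat} (x1 x2 : Int) (hx1 : 0 ≤ x1) (hx2 : x2 ≤ (N : Int)) :
    ∀ (L : List Int) (g : List (List Int)), Shape g M N → (∀ r ∈ L, 0 ≤ r ∧ r < (M : Int)) →
      Shape (L.foldl (fun b r => (PySem.List.pyRange x1 x2 1).foldl (fun b y => setG b r y 0) b) g) M N ∧
      ∀ a b : Int, 0 ≤ a → 0 ≤ b →
        cellG 0 (L.foldl (fun b r => (PySem.List.pyRange x1 x2 1).foldl (fun b y => setG b r y 0) b) g) a b
          = if a ∈ L ∧ x1 ≤ b ∧ b < x2 then 0 else cellG 0 g a b := by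
  intro L
  induction L with
  | nil => intro g hs _; exact ⟨hs, by simp⟩
  | cons r L ih =>
      intro g hs hL
      have hr := hL r (by simp)
      obtain ⟨hs1, hc1⟩ := markColsL r hr.1 hr.2 (PySem.List.pyRange x1 x2 1) g hs
        (fun c hc => by
          rw [PySem.List.mem_pyRange_one] at hc
          exact ⟨by omega, by omega⟩)
      obtain ⟨ihs, ihc⟩ := ih _ hs1 (fun e he => hL e (by simp [he]))
      refine ⟨by simpa using ihs, ?_⟩
      intro a b ha hb
      simp only [List.foldl_cons] at *
      rw [ihc a b ha hb, hc1 a b ha hb]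
      simp only [PySem.List.mem_pyRange_one, List.mem_cons]
      by_cases h1 : a = r <;> by_cases h2 : a ∈ L <;> by_cases h3 : x1 ≤ b ∧ b < x2 <;>
        simp [h1, h2, h3] <;> omega

def rectOK (m n : Int) (r : Int × Int × Int × Int) : Prop :=
  (r.1 < r.2.2.1 ∧ r.2.1 < r.2.2.2) → (0 ≤ r.1 ∧ r.2.2.1 ≤ n ∧ 0 ≤ r.2.1 ∧ r.2.2.2 ≤ m)

def coversb (x y : Int) (r : Int × Int × Int × Int) : Bool :=
  decide (r.1 ≤ y ∧ y < r.2.2.1 ∧ r.2.1 ≤ x ∧ x < r.2.2.2)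

theorem markAll_spec (m n : Int) :
    ∀ (rects : List (Int × Int × Int × Int)) (g : List (List Int)),
      Shape g m.toNat n.toNat → (∀ r ∈ rects, rectOK m n r) →
      Shape (rects.foldl (fun b r =>
          (PySem.List.pyRange r.2.1 r.2.2.2 1).foldl (fun b x =>
            (PySem.List.pyRange r.1 r.2.2.1 1).foldl (fun b y => setG b x y 0) b) b) g) m.toNat n.toNat ∧
      ∀ a b : Int, 0 ≤ a → 0 ≤ b →
        cellG 0 (rects.foldl (fun b r =>
          (PySem.List.pyRange r.2.1 r.2.2.2 1).foldl (fun b x =>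
            (PySem.List.pyRange r.1 r.2.2.1 1).foldl (fun b y => setG b x y 0) b) b) g) a b
          = if rects.any (coversb a b) then 0 else cellG 0 g a b := by
  intro rects
  induction rects with
  | nil => intro g hs _; exact ⟨hs, by simp⟩
  | cons r rects ih =>
      intro g hs hR
      have hr := hR r (by simp)
      unfold rectOK at hr
      by_cases heff : r.1 < r.2.2.1 ∧ r.2.1 < r.2.2.2
      · obtain ⟨h1, h4, h5, h8⟩ := hr heff
        obtain ⟨hs1, hc1⟩ := markRowsL r.1 r.2.2.1 h1 (by omega)
          (PySem.List.pyRange r.2.1 r.2.2.2 1) g hs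
          (fun e he => by rw [PySem.List.mem_pyRange_one] at he; omega)
        obtain ⟨ihs, ihc⟩ := ih _ hs1 (fun e he => hR e (by simp [he]))
        refine ⟨by simpa using ihs, ?_⟩
        intro a b ha hb
        simp only [List.foldl_cons] at *
        rw [ihc a b ha hb, hc1 a b ha hb]
        simp only [PySem.List.mem_pyRange_one, List.any_cons, coversb]
        by_cases c1 : rects.any (coversb a b) = true <;>
          by_cases c2 : r.1 ≤ b ∧ b < r.2.2.1 ∧ r.2.1 ≤ a ∧ a < r.2.2.2 <;>
            simp [c1, c2, coversb] <;> tauto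
      · have hg : (PySem.List.pyRange r.2.1 r.2.2.2 1).foldl (fun b x =>
            (PySem.List.pyRange r.1 r.2.2.1 1).foldl (fun b y => setG b x y 0) b) g = g := by
          rcases not_and_or.1 heff with hcase | hcase
          · simp only [PySem.List.pyRange_one_eq_nil (show r.2.2.1 ≤ r.1 by omega), List.foldl_nil]
            exact PySem.List.foldl_ignore _ _
          · rw [PySem.List.pyRange_one_eq_nil (show r.2.2.2 ≤ r.2.1 by omega), List.foldl_nil]
        obtain ⟨ihs, ihc⟩ := ih g hs (fun e he => hR e (by simp [he]))
        constructor
        · simp only [List.foldl_cons]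
          rw [hg]
          exact ihs
        · intro a b ha hb
          simp only [List.foldl_cons]
          rw [hg, ihc a b ha hb]
          have hcov : coversb a b r = false := by
            simp only [coversb, decide_eq_false_iff_not]
            intro hc
            exact heff ⟨by omega, by omega⟩
          simp only [List.any_cons, hcov, Bool.false_or]

def deltaM (r : Int × Int × Int × Int) (a b : Int) : Int :=
  if r.1 < r.2.2.1 ∧ r.2.1 ≤ a ∧ a < r.2.2.2 then
    (if b = r.1 then 1 else 0) + (if b = r.2.2.1 then -1 else 0)
  else 0

theorem bump2_cell {M N : Nat} {g : List (List Int)} (hs : Shape g M N)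
    (x x1 x2 : Int) (hx : 0 ≤ x) (hx' : x < (M : Int))
    (h1 : 0 ≤ x1) (h1' : x1 < (N : Int)) (h2 : 0 ≤ x2) (h2' : x2 < (N : Int)) (hne : x1 ≠ x2)
    (a b : Int) (ha : 0 ≤ a) (hb : 0 ≤ b) :
    cellG 0 (setG (setG g x x1 (cellG 0 g x x1 + 1)) x x2
        (cellG 0 (setG g x x1 (cellG 0 g x x1 + 1)) x x2 - 1)) a b
      = cellG 0 g a b +
        (if a = x then (if b = x1 then 1 else 0) + (if b = x2 then -1 else 0) else 0) := by
  have hs1 : Shape (setG g x x1 (cellG 0 g x x1 + 1)) M N := shape_setG hs _ _ _ hx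
  have hread : cellG 0 (setG g x x1 (cellG 0 g x x1 + 1)) x x2 = cellG 0 g x x2 := by
    rw [cellG_setG _ _ hs x x2 hx hx' h1 h1' hx h2]
    simp [Ne.symm hne]
  rw [cellG_setG _ _ hs1 a b hx hx' h2 h2' ha hb,
      cellG_setG _ _ hs a b hx hx' h1 h1' ha hb, hread]
  by_cases c1 : a = x <;> by_cases c2 : b = x1 <;> by_cases c3 : b = x2 <;>
    simp_all [cellG_setG _ _ hs x x2 hx hx' h1 h1' hx h2] <;> omega

theorem bumpRowsL {N : Nat} (M : Nat) (x1 x2 : Int)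
    (h1 : 0 ≤ x1) (h1' : x1 < (N : Int)) (h2 : 0 ≤ x2) (h2' : x2 < (N : Int)) (hne : x1 ≠ x2) :
    ∀ (L : List Int) (g : List (List Int)), Shape g M N → L.Nodup →
      (∀ c ∈ L, 0 ≤ c ∧ c < (M : Int)) →
      Shape (L.foldl (fun g x => setG (setG g x x1 (cellG 0 g x x1 + 1)) x x2
          (cellG 0 (setG g x x1 (cellG 0 g x x1 + 1)) x x2 - 1)) g) M N ∧
      ∀ a b : Int, 0 ≤ a → 0 ≤ b →
        cellG 0 (L.foldl (fun g x => setG (setG g x x1 (cellG 0 g x x1 + 1)) x x2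
            (cellG 0 (setG g x x1 (cellG 0 g x x1 + 1)) x x2 - 1)) g) a b
          = cellG 0 g a b +
            (if a ∈ L then (if b = x1 then 1 else 0) + (if b = x2 then -1 else 0) else 0) := by
  intro L
  induction L with
  | nil => intro g hs _ _; exact ⟨hs, by simp⟩
  | cons c L ih =>
      intro g hs hnd hL
      have hc := hL c (by simp)
      have hs' : Shape (setG (setG g c x1 (cellG 0 g c x1 + 1)) c x2
          (cellG 0 (setG g c x1 (cellG 0 g c x1 + 1)) c x2 - 1)) M N :=
        shape_setG (shape_setG hs _ _ _ hc.1) _ _ _ hc.1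
      obtain ⟨ihs, ihc⟩ := ih _ hs' (List.Nodup.of_cons hnd) (fun e he => hL e (by simp [he]))
      refine ⟨by simpa using ihs, ?_⟩
      intro a b ha hb
      simp only [List.foldl_cons] at *
      rw [ihc a b ha hb, bump2_cell hs c x1 x2 hc.1 hc.2 h1 h1' h2 h2' hne a b ha hb]
      have hcn : c ∉ L := (List.nodup_cons.1 hnd).1
      by_cases e1 : a = c <;> by_cases e2 : a ∈ L <;> simp_all [List.mem_cons] <;> omega

theorem marksAll_spec (m n : Int) :
    ∀ (rects : List (Int × Int × Int × Int)) (g : List (List Int)),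
      Shape g m.toNat (n + 1).toNat → (∀ r ∈ rects, rectOK m n r) →
      Shape (rects.foldl (fun g r =>
          if r.1 < r.2.2.1 then
            (PySem.List.pyRange r.2.1 r.2.2.2 1).foldl (fun g x =>
              setG (setG g x r.1 (cellG 0 g x r.1 + 1)) x r.2.2.1
                (cellG 0 (setG g x r.1 (cellG 0 g x r.1 + 1)) x r.2.2.1 - 1)) g
          else g) g) m.toNat (n + 1).toNat ∧
      ∀ a b : Int, 0 ≤ a → 0 ≤ b →
        cellG 0 (rects.foldl (fun g r =>
          if r.1 < r.2.2.1 then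
            (PySem.List.pyRange r.2.1 r.2.2.2 1).foldl (fun g x =>
              setG (setG g x r.1 (cellG 0 g x r.1 + 1)) x r.2.2.1
                (cellG 0 (setG g x r.1 (cellG 0 g x r.1 + 1)) x r.2.2.1 - 1)) g
          else g) g) a b
          = cellG 0 g a b + (rects.map (fun r => deltaM r a b)).sum := by
  intro rects
  induction rects with
  | nil => intro g hs _; exact ⟨hs, by simp⟩
  | cons r rects ih =>
      intro g hs hR
      have hr := hR r (by simp)
      unfold rectOK at hr
      by_cases hlt : r.1 < r.2.2.1
      · by_cases hy : r.2.1 < r.2.2.2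
        · obtain ⟨h1, h4, h5, h8⟩ := hr ⟨hlt, hy⟩
          obtain ⟨hs1, hc1⟩ := bumpRowsL m.toNat r.1 r.2.2.1 h1 (by omega) (by omega) (by omega)
            (by omega) (PySem.List.pyRange r.2.1 r.2.2.2 1) g hs
            (PySem.List.nodup_pyRange_one _ _)
            (fun e he => by rw [PySem.List.mem_pyRange_one] at he; omega)
          obtain ⟨ihs, ihc⟩ := ih _ hs1 (fun e he => hR e (by simp [he]))
          refine ⟨by simpa [hlt] using ihs, ?_⟩
          intro a b ha hb
          simp only [List.foldl_cons, if_pos hlt] at *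
          rw [ihc a b ha hb, hc1 a b ha hb]
          simp only [List.map_cons, List.sum_cons, deltaM, PySem.List.mem_pyRange_one]
          by_cases c2 : r.2.1 ≤ a ∧ a < r.2.2.2 <;> simp [c2, hlt] <;> ring
        · obtain ⟨ihs, ihc⟩ := ih g hs (fun e he => hR e (by simp [he]))
          constructor
          · simp only [List.foldl_cons, if_pos hlt,
              PySem.List.pyRange_one_eq_nil (show r.2.2.2 ≤ r.2.1 by omega), List.foldl_nil]
            exact ihs
          · intro a b ha hb
            simp only [List.foldl_cons, if_pos hlt,
              PySem.List.pyRange_one_eq_nil (show r.2.2.2 ≤ r.2.1 by omega), List.foldl_nil]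
            rw [ihc a b ha hb]
            have hd : deltaM r a b = 0 := by
              simp only [deltaM, ite_eq_right_iff]
              intro hc
              omega
            simp [hd]
      · obtain ⟨ihs, ihc⟩ := ih _ hs (fun e he => hR e (by simp [he]))
        refine ⟨by simpa [hlt] using ihs, ?_⟩
        intro a b ha hb
        simp only [List.foldl_cons, if_neg hlt] at *
        rw [ihc a b ha hb]
        simp [deltaM, hlt]

theorem scan_pyRange (f : Int → Int) (t : Nat) :
    (PySem.List.pyRange 0 (t : Int) 1).foldl
        (fun (p : List Int × Int) y => (p.1 ++ [p.2 + f y], p.2 + f y)) (([] : List Int), (0 : Int))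
      = ((List.range t).map (fun (j : Nat) => ((PySem.List.pyRange 0 ((j : Int) + 1) 1).map f).sum),
         ((PySem.List.pyRange 0 (t : Int) 1).map f).sum) := by
  induction t with
  | zero => simp [PySem.List.pyRange_one_eq_nil]
  | succ t ih =>
      have hcast : ((t + 1 : Nat) : Int) = (t : Int) + 1 := by push_cast; ring
      rw [hcast, PySem.List.pyRange_one_succ_right (by positivity), List.foldl_append, ih]
      simp [List.range_succ, PySem.List.pyRange_one_succ_right, Int.natCast_nonneg]

theorem sum_swap' {ρ : Type} (R : List ρ) (L : List Int) (f : ρ → Int → Int) :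
    (L.map (fun j => (R.map (fun r => f r j)).sum)).sum
      = (R.map (fun r => (L.map (f r)).sum)).sum := by
  induction R with
  | nil => simp
  | cons r R ih =>
      simp only [List.map_cons, List.sum_cons]
      rw [← ih, ← PySem.List.sum_map_add_int]

theorem sum_ite_mem (c v : Int) : ∀ (L : List Int), L.Nodup →
    (L.map (fun j => if j = c then v else 0)).sum = if c ∈ L then v else 0 := by
  intro L
  induction L with
  | nil => simp
  | cons e L ih =>
      intro hnd
      simp only [List.map_cons, List.sum_cons, List.mem_cons]
      rw [ih (List.Nodup.of_cons hnd)]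
      by_cases h1 : e = c
      · subst h1
        have : e ∉ L := (List.nodup_cons.1 hnd).1
        simp [this]
      · by_cases h2 : c ∈ L <;> simp [h1, h2, Ne.symm h1]

theorem sum_deltaM (m n : Int) (r : Int × Int × Int × Int) (hOK : rectOK m n r)
    (a y : Int) (hy : 0 ≤ y) :
    ((PySem.List.pyRange 0 (y + 1) 1).map (fun j => deltaM r a j)).sum
      = if coversb a y r then 1 else 0 := by
  unfold rectOK at hOK
  by_cases hC : r.1 < r.2.2.1 ∧ r.2.1 ≤ a ∧ a < r.2.2.2
  · have : ∀ j : Int, deltaM r a j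
        = (if j = r.1 then 1 else 0) + (if j = r.2.2.1 then (-1 : Int) else 0) := by
      intro j; simp [deltaM, hC]
    obtain ⟨h1, h4, h5, h8⟩ := hOK ⟨hC.1, by omega⟩
    simp only [this]
    rw [PySem.List.sum_map_add_int, sum_ite_mem _ _ _ (PySem.List.nodup_pyRange_one _ _),
        sum_ite_mem _ _ _ (PySem.List.nodup_pyRange_one _ _)]
    simp only [PySem.List.mem_pyRange_one, coversb]
    by_cases e1 : r.1 ≤ y <;> by_cases e2 : r.2.2.1 ≤ y <;>
      simp [e1, e2] <;> omega
  · have : ∀ j : Int, deltaM r a j = 0 := by intro j; simp [deltaM, hC]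
    simp only [this]
    have hcov : coversb a y r = false := by
      simp only [coversb, decide_eq_false_iff_not]
      intro h; exact hC ⟨by omega, by omega, by omega⟩
    simp [hcov]

theorem cover_cell (m n : Int) (marks : List (List Int)) (x y : Int)
    (hx : 0 ≤ x) (hx' : x < m) (hy : 0 ≤ y) (hy' : y < n) :
    cellG 0 ((PySem.List.pyRange 0 m 1).foldl
      (fun (cov : List (List Int)) x =>
        cov ++ [((PySem.List.pyRange 0 n 1).foldl
          (fun (p : List Int × Int) y => (p.1 ++ [p.2 + cellG 0 marks x y], p.2 + cellG 0 marks x y))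
          (([] : List Int), (0 : Int))).1]) []) x y
      = ((PySem.List.pyRange 0 (y + 1) 1).map (fun j => cellG 0 marks x j)).sum := by
  rw [PySem.List.foldl_append_singleton_eq_map
    (f := fun x => ((PySem.List.pyRange 0 n 1).foldl
      (fun (p : List Int × Int) y => (p.1 ++ [p.2 + cellG 0 marks x y], p.2 + cellG 0 marks x y))
      (([] : List Int), (0 : Int))).1)]
  rw [show ∀ (g : List (List Int)), cellG 0 g x y = PySem.List.pyGetD (PySem.List.pyGetD g x []) y 0 from fun _ => rfl]
  rw [List.nil_append, PySem.List.pyGetD_map_pyRange_of_nonneg _ _ _ _ hx hx']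
  have hn' : n = ((n.toNat : Nat) : Int) := by omega
  rw [hn', scan_pyRange (fun y => cellG 0 marks x y) n.toNat]
  rw [pyGetD_nonneg _ _ hy]
  rw [PySem.List.getD_map_range _ _ _ _ (by omega)]
  have hy2 : ((y.toNat : Nat) : Int) = y := by omega
  rw [hy2]

theorem cover_count (m n : Int) (rects : List (Int × Int × Int × Int))
    (hR : ∀ r ∈ rects, rectOK m n r) (marks : List (List Int))
    (hmk : ∀ a j : Int, 0 ≤ a → a < m → 0 ≤ j → j ≤ n →
      cellG 0 marks a j = (rects.map (fun r => deltaM r a j)).sum)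
    (a b : Int) (ha : 0 ≤ a) (ha2 : a < m) (hb : 0 ≤ b) (hb2 : b < n) :
    ((PySem.List.pyRange 0 (b + 1) 1).map (fun j => cellG 0 marks a j)).sum
      = ((rects.countP (fun r => coversb a b r) : Nat) : Int) := by
  calc ((PySem.List.pyRange 0 (b + 1) 1).map (fun j => cellG 0 marks a j)).sum
      = ((PySem.List.pyRange 0 (b + 1) 1).map
          (fun j => (rects.map (fun r => deltaM r a j)).sum)).sum := by
        refine congrArg List.sum (List.map_congr_left ?_)
        intro j hj
        rw [PySem.List.mem_pyRange_one] at hj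
        exact hmk a j ha ha2 hj.1 (by omega)
    _ = (rects.map (fun r =>
          ((PySem.List.pyRange 0 (b + 1) 1).map (fun j => deltaM r a j)).sum)).sum :=
        sum_swap' rects (PySem.List.pyRange 0 (b + 1) 1) (fun r j => deltaM r a j)
    _ = (rects.map (fun r => if coversb a b r then (1 : Int) else 0)).sum := by
        refine congrArg List.sum (List.map_congr_left ?_)
        intro r hr
        exact sum_deltaM m n r (hR r hr) a b hb
    _ = ((rects.countP (fun r => coversb a b r) : Nat) : Int) :=
        PySem.List.sum_map_ite_one_zero _ _

-- ===== worklist abstraction: both fills compute visited ∪ component and its size =====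
def nbrs (c : Int × Int) : List (Int × Int) :=
  [(c.1 + 1, c.2), (c.1, c.2 + 1), (c.1 - 1, c.2), (c.1, c.2 - 1)]

def stepG (free : Int × Int → Bool) (st : Finset (Int × Int) × List (Int × Int))
    (d : Int × Int) : Finset (Int × Int) × List (Int × Int) :=
  if free d ∧ d ∉ st.1 then (insert d st.1, st.2 ++ [d]) else st

def gloop (free : Int × Int → Bool)
    (pop : List (Int × Int) → Option ((Int × Int) × List (Int × Int))) :
    Nat → List (Int × Int) → Finset (Int × Int) → Int → Finset (Int × Int) × Int
  | 0, _, V, a => (V, a)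
  | fuel + 1, W, V, a =>
      match pop W with
      | none => (V, a)
      | some (c, rest) =>
          let st := (nbrs c).foldl (stepG free) (V, rest)
          gloop free pop fuel st.2 st.1 (a + 1)

def popHead : List (Int × Int) → Option ((Int × Int) × List (Int × Int))
  | [] => none
  | c :: rest => some (c, rest)

def popLast (W : List (Int × Int)) : Option ((Int × Int) × List (Int × Int)) :=
  match W.getLast? with
  | none => none
  | some c => some (c, W.dropLast)

inductive Reach (free : Int × Int → Bool) (V0 : Finset (Int × Int))
    (src : List (Int × Int)) : Int × Int → Prop
  | base {c : Int × Int} : c ∈ src → Reach free V0 src c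
  | step {c d : Int × Int} : Reach free V0 src c → d ∈ nbrs c → free d = true →
      d ∉ V0 → Reach free V0 src d

noncomputable def reachSet (free : Int × Int → Bool) (V0 : Finset (Int × Int))
    (src : List (Int × Int)) (U : Finset (Int × Int)) : Finset (Int × Int) :=
  @Finset.filter _ (Reach free V0 src) (fun _ => Classical.propDecidable _) U

theorem mem_reachSet {free : Int × Int → Bool} {V0 : Finset (Int × Int)}
    {src : List (Int × Int)} {U : Finset (Int × Int)} {c : Int × Int} :
    c ∈ reachSet free V0 src U ↔ c ∈ U ∧ Reach free V0 src c := by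
  unfold reachSet
  exact @Finset.mem_filter _ _ (fun _ => Classical.propDecidable _) _ _

theorem fold_news (free : Int × Int → Bool) :
    ∀ (ds : List (Int × Int)) (V : Finset (Int × Int)) (rest : List (Int × Int)),
      ∃ L : List (Int × Int),
        ds.foldl (stepG free) (V, rest) = (V ∪ L.toFinset, rest ++ L) ∧
        L.Nodup ∧
        (∀ x ∈ L, x ∈ ds ∧ free x = true ∧ x ∉ V) ∧
        (∀ x ∈ ds, free x = true → x ∈ V ∪ L.toFinset) := by
  intro ds
  induction ds with
  | nil =>
      intro V rest
      exact ⟨[], by simp, by simp, by simp, by simp⟩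
  | cons d ds ih =>
      intro V rest
      by_cases hc : free d = true ∧ d ∉ V
      · obtain ⟨L, heq, hnd, hmem, hcomp⟩ := ih (insert d V) (rest ++ [d])
        refine ⟨d :: L, ?_, ?_, ?_, ?_⟩
        · simp only [List.foldl_cons, stepG, if_pos hc]
          rw [heq]
          exact Prod.ext (by ext x; simp; try tauto) (by simp)
        · refine List.nodup_cons.2 ⟨fun hdL => ?_, hnd⟩
          exact (hmem d hdL).2.2 (Finset.mem_insert_self d V)
        · intro x hx
          rcases List.mem_cons.1 hx with h | h
          · subst h; exact ⟨by simp, hc.1, hc.2⟩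
          · obtain ⟨h1, h2, h3⟩ := hmem x h
            exact ⟨by simp [h1], h2, fun hxV => h3 (Finset.mem_insert_of_mem hxV)⟩
        · intro x hx hf
          rcases List.mem_cons.1 hx with h | h
          · subst h; simp
          · have := hcomp x h hf
            simp only [Finset.mem_union, Finset.mem_insert, List.mem_toFinset,
              List.mem_cons] at this ⊢
            tauto
      · obtain ⟨L, heq, hnd, hmem, hcomp⟩ := ih V rest
        refine ⟨L, ?_, hnd, ?_, ?_⟩
        · simp only [List.foldl_cons, stepG, if_neg hc]
          exact heq
        · intro x hx
          obtain ⟨h1, h2, h3⟩ := hmem x hx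
          exact ⟨by simp [h1], h2, h3⟩
        · intro x hx hf
          rcases List.mem_cons.1 hx with h | h
          · subst h
            have hxV : x ∈ V := by
              by_contra hxV
              exact hc ⟨hf, hxV⟩
            exact Finset.mem_union_left _ hxV
          · exact hcomp x h hf

theorem gloop_final (free : Int × Int → Bool) (V0 : Finset (Int × Int))
    (src : List (Int × Int)) (U : Finset (Int × Int))
    (V P : Finset (Int × Int)) (a0 a : Int)
    (h2 : V = V0 ∪ P)
    (h3 : ∀ c ∈ src, c ∈ P)
    (h4 : ∀ c ∈ P, c ∈ reachSet free V0 src U)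
    (h5 : ∀ c ∈ P, ∀ d ∈ nbrs c, free d = true → d ∉ V0 → d ∈ V)
    (h7 : a = a0 + (P.card : Int)) :
    V = V0 ∪ reachSet free V0 src U ∧ a = a0 + ((reachSet free V0 src U).card : Int) := by
  have hPR : P = reachSet free V0 src U := by
    apply Finset.Subset.antisymm
    · intro x hx; exact h4 x hx
    · intro x hx
      have hr := (mem_reachSet.1 hx).2
      clear hx
      induction hr with
      | base h => exact h3 _ h
      | step hc hd hf hv ih =>
          have hxV := h5 _ ih _ hd hf hv
          rw [h2] at hxV
          rcases Finset.mem_union.1 hxV with h | h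
          · exact absurd h hv
          · exact h
  rw [hPR] at h2 h7
  exact ⟨h2, h7⟩

theorem gloop_run (free : Int × Int → Bool)
    (pop : List (Int × Int) → Option ((Int × Int) × List (Int × Int)))
    (hpopn : pop [] = none)
    (hpops : ∀ (W : List (Int × Int)), W ≠ [] →
      ∃ c rest, pop W = some (c, rest) ∧ W.Perm (c :: rest))
    (V0 : Finset (Int × Int)) (src : List (Int × Int)) (U : Finset (Int × Int))
    (hfreeU : ∀ c, free c = true → c ∈ U) (a0 : Int) :
    ∀ (fuel : Nat) (W : List (Int × Int)) (V P : Finset (Int × Int)) (a : Int),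
      W.Nodup →
      V = V0 ∪ P ∪ W.toFinset →
      (∀ c ∈ src, c ∈ P ∨ c ∈ W) →
      (∀ c ∈ P, c ∈ reachSet free V0 src U) →
      (∀ c ∈ W, c ∈ reachSet free V0 src U) →
      (∀ c ∈ P, ∀ d ∈ nbrs c, free d = true → d ∉ V0 → d ∈ V) →
      (∀ c ∈ P, c ∉ W) →
      a = a0 + (P.card : Int) →
      W.length + (reachSet free V0 src U \ V).card ≤ fuel →
      gloop free pop fuel W V a
        = (V0 ∪ reachSet free V0 src U, a0 + ((reachSet free V0 src U).card : Int)) := by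
  intro fuel
  induction fuel with
  | zero =>
      intro W V P a hnd h2 h3 h4P h4W h5 h6 h7 hfuel
      have hWnil : W = [] := by
        cases W with
        | nil => rfl
        | cons c rest => simp at hfuel
      subst hWnil
      simp only [gloop]
      have h2' : V = V0 ∪ P := by simpa using h2
      have h3' : ∀ c ∈ src, c ∈ P := by
        intro c hc
        rcases h3 c hc with h | h
        · exact h
        · simp at h
      have := gloop_final free V0 src U V P a0 a h2' h3' h4P h5 h7
      exact Prod.ext this.1 this.2
  | succ fuel ih =>
      intro W V P a hnd h2 h3 h4P h4W h5 h6 h7 hfuel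
      by_cases hWnil : W = []
      · subst hWnil
        simp only [gloop, hpopn]
        have h2' : V = V0 ∪ P := by simpa using h2
        have h3' : ∀ c ∈ src, c ∈ P := by
          intro c hc
          rcases h3 c hc with h | h
          · exact h
          · simp at h
        have := gloop_final free V0 src U V P a0 a h2' h3' h4P h5 h7
        exact Prod.ext this.1 this.2
      · obtain ⟨c, rest, hpe, hperm⟩ := hpops W hWnil
        have hndcr : (c :: rest).Nodup := hperm.nodup_iff.1 hnd
        have hcr : c ∉ rest := (List.nodup_cons.1 hndcr).1
        have hndr : rest.Nodup := (List.nodup_cons.1 hndcr).2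
        have hmemW : ∀ x, x ∈ W ↔ x = c ∨ x ∈ rest := by
          intro x
          rw [hperm.mem_iff, List.mem_cons]
        have hlenW : W.length = rest.length + 1 := by
          have := hperm.length_eq
          simpa using this
        have hcW : c ∈ W := (hmemW c).2 (Or.inl rfl)
        have hWV : ∀ x ∈ W, x ∈ V := by
          intro x hx
          rw [h2]
          exact Finset.mem_union_right _ (List.mem_toFinset.2 hx)
        have hcV : c ∈ V := hWV c hcW
        have hV0V : ∀ x ∈ V0, x ∈ V := by
          intro x hx
          rw [h2]
          exact Finset.mem_union_left _ (Finset.mem_union_left _ hx)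
        have hcRS := h4W c hcW
        have hcReach : Reach free V0 src c := (mem_reachSet.1 hcRS).2
        obtain ⟨L, hfold, hLnd, hLmem, hLcomp⟩ := fold_news free (nbrs c) V rest
        have hLV : ∀ x ∈ L, x ∉ V := fun x hx => (hLmem x hx).2.2
        have hLRS : ∀ x ∈ L, x ∈ reachSet free V0 src U := by
          intro x hx
          obtain ⟨hxn, hxf, hxV⟩ := hLmem x hx
          refine mem_reachSet.2 ⟨hfreeU x hxf, ?_⟩
          exact Reach.step hcReach hxn hxf (fun h => hxV (hV0V x h))
        simp only [gloop, hpe, hfold]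
        apply ih (rest ++ L) (V ∪ L.toFinset) (insert c P) (a + 1)
        · refine List.Nodup.append hndr hLnd ?_
          rw [List.disjoint_left]
          intro x hxr hxL
          exact hLV x hxL (hWV x ((hmemW x).2 (Or.inr hxr)))
        · rw [h2]
          ext x
          simp only [Finset.mem_union, Finset.mem_insert, List.mem_toFinset,
            List.mem_append, hmemW x]
          tauto
        · intro c' hc'
          rcases h3 c' hc' with h | h
          · exact Or.inl (Finset.mem_insert_of_mem h)
          · rcases (hmemW c').1 h with h | h
            · exact Or.inl (h ▸ Finset.mem_insert_self c P)
            · exact Or.inr (List.mem_append_left _ h)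
        · intro x hx
          rcases Finset.mem_insert.1 hx with h | h
          · exact h ▸ hcRS
          · exact h4P x h
        · intro x hx
          rcases List.mem_append.1 hx with h | h
          · exact h4W x ((hmemW x).2 (Or.inr h))
          · exact hLRS x h
        · intro p hp d hd hf hv0
          rcases Finset.mem_insert.1 hp with h | h
          · subst h
            exact hLcomp d hd hf
          · exact Finset.mem_union_left _ (h5 p h d hd hf hv0)
        · intro p hp
          rcases Finset.mem_insert.1 hp with h | h
          · intro hmem
            rw [h] at hmem
            rcases List.mem_append.1 hmem with h' | h'
            · exact hcr h'
            · exact hLV c h' hcV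
          · intro hmem
            rcases List.mem_append.1 hmem with h' | h'
            · exact h6 p h ((hmemW p).2 (Or.inr h'))
            · exact hLV p h' (by rw [h2]; exact Finset.mem_union_left _ (Finset.mem_union_right _ h))
        · have hcP : c ∉ P := fun h => h6 c h hcW
          rw [Finset.card_insert_of_notMem hcP]
          push_cast
          omega
        · have hsd : reachSet free V0 src U \ (V ∪ L.toFinset) = (reachSet free V0 src U \ V) \ L.toFinset := by
            ext x; simp only [Finset.mem_sdiff, Finset.mem_union]; tauto
          have hsub : L.toFinset ⊆ reachSet free V0 src U \ V := by
            intro x hx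
            rw [List.mem_toFinset] at hx
            exact Finset.mem_sdiff.2 ⟨hLRS x hx, hLV x hx⟩
          have hc1 : ((reachSet free V0 src U \ V) \ L.toFinset).card
              = (reachSet free V0 src U \ V).card - L.toFinset.card := by
            rw [Finset.card_sdiff, Finset.inter_eq_left.mpr hsub]
          have hc2 : L.toFinset.card ≤ (reachSet free V0 src U \ V).card :=
            Finset.card_le_card hsub
          have hc3 : L.toFinset.card = L.length := List.toFinset_card_of_nodup hLnd
          rw [hsd]
          simp only [List.length_append]
          omega

-- ===== simulation of port A's BFS loop by the abstract worklist loop =====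
def GridRel (m n : Int) (v : List (List Bool)) (V : Finset (Int × Int)) : Prop :=
  Shape v m.toNat n.toNat ∧
  (∀ c : Int × Int, 0 ≤ c.1 → c.1 < m → 0 ≤ c.2 → c.2 < n →
    (cellG false v c.1 c.2 = true ↔ c ∈ V)) ∧
  (∀ c ∈ V, 0 ≤ c.1 ∧ c.1 < m ∧ 0 ≤ c.2 ∧ c.2 < n)

def stepA (m n : Int) (board : List (List Int))
    (st : List (List Bool) × List (Int × Int)) (e : Int × Int) :
    List (List Bool) × List (Int × Int) :=
  if 0 ≤ e.1 ∧ e.1 < m ∧ 0 ≤ e.2 ∧ e.2 < n ∧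
     cellG false st.1 e.1 e.2 = false ∧ cellG 0 board e.1 e.2 = 1 then
    (setG st.1 e.1 e.2 true, st.2 ++ [e])
  else st

theorem GridRel_insert {m n : Int} {v : List (List Bool)} {V : Finset (Int × Int)}
    (h : GridRel m n v V) {s : Int × Int}
    (hs : 0 ≤ s.1 ∧ s.1 < m ∧ 0 ≤ s.2 ∧ s.2 < n) :
    GridRel m n (setG v s.1 s.2 true) (insert s V) := by
  obtain ⟨hsh, hrd, hbd⟩ := h
  obtain ⟨hs1, hs2, hs3, hs4⟩ := hs
  have hm : ((m.toNat : Nat) : Int) = m := by omega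
  have hn : ((n.toNat : Nat) : Int) = n := by omega
  refine ⟨shape_setG hsh _ _ _ hs1, ?_, ?_⟩
  · intro c hc1 hc2 hc3 hc4
    rw [cellG_setG _ _ hsh c.1 c.2 hs1 (by omega) hs3 (by omega) hc1 hc3]
    by_cases he : c = s
    · subst he
      simp
    · have hne : ¬ (c.1 = s.1 ∧ c.2 = s.2) := by
        intro hh
        exact he (Prod.ext hh.1 hh.2)
      rw [if_neg hne]
      rw [hrd c hc1 hc2 hc3 hc4]
      simp [Finset.mem_insert, he]
  · intro c hc
    rcases Finset.mem_insert.1 hc with h | h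
    · subst h; exact ⟨hs1, hs2, hs3, hs4⟩
    · exact hbd c h

theorem foldAG (m n : Int) (board : List (List Int)) (free : Int × Int → Bool)
    (hfree : ∀ c : Int × Int, free c = true ↔
      (0 ≤ c.1 ∧ c.1 < m ∧ 0 ≤ c.2 ∧ c.2 < n ∧ cellG 0 board c.1 c.2 = 1)) :
    ∀ (ds : List (Int × Int)) (v : List (List Bool)) (V : Finset (Int × Int))
      (W : List (Int × Int)),
      GridRel m n v V →
      GridRel m n (ds.foldl (stepA m n board) (v, W)).1
        ((ds.foldl (stepG free) (V, W)).1) ∧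
      (ds.foldl (stepA m n board) (v, W)).2 = (ds.foldl (stepG free) (V, W)).2 := by
  intro ds
  induction ds with
  | nil => intro v V W h; exact ⟨h, rfl⟩
  | cons d ds ih =>
      intro v V W h
      have hiff : (0 ≤ d.1 ∧ d.1 < m ∧ 0 ≤ d.2 ∧ d.2 < n ∧
          cellG false v d.1 d.2 = false ∧ cellG 0 board d.1 d.2 = 1)
          ↔ (free d = true ∧ d ∉ V) := by
        rw [hfree]
        constructor
        · rintro ⟨a1, a2, a3, a4, a5, a6⟩
          refine ⟨⟨a1, a2, a3, a4, a6⟩, fun hdV => ?_⟩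
          rw [← h.2.1 d a1 a2 a3 a4] at hdV
          rw [a5] at hdV
          exact Bool.false_ne_true hdV
        · rintro ⟨⟨a1, a2, a3, a4, a6⟩, hdV⟩
          refine ⟨a1, a2, a3, a4, ?_, a6⟩
          rcases Bool.eq_false_or_eq_true (cellG false v d.1 d.2) with hb | hb
          · exact absurd ((h.2.1 d a1 a2 a3 a4).1 hb) hdV
          · exact hb
      simp only [List.foldl_cons]
      by_cases hc : free d = true ∧ d ∉ V
      · have hcA := hiff.2 hc
        rw [show stepA m n board (v, W) d = (setG v d.1 d.2 true, W ++ [d]) from by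
              simp only [stepA, if_pos hcA],
            show stepG free (V, W) d = (insert d V, W ++ [d]) from by
              simp only [stepG, if_pos hc]]
        exact ih _ _ _ (GridRel_insert h ⟨hcA.1, hcA.2.1, hcA.2.2.1, hcA.2.2.2.1⟩)
      · have hcA : ¬ (0 ≤ d.1 ∧ d.1 < m ∧ 0 ≤ d.2 ∧ d.2 < n ∧
            cellG false v d.1 d.2 = false ∧ cellG 0 board d.1 d.2 = 1) := fun hh => hc (hiff.1 hh)
        rw [show stepA m n board (v, W) d = (v, W) from by simp only [stepA, if_neg hcA],
            show stepG free (V, W) d = (V, W) from by simp only [stepG, if_neg hc]]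
        exact ih _ _ _ h

theorem simA (m n : Int) (board : List (List Int)) (free : Int × Int → Bool)
    (hfree : ∀ c : Int × Int, free c = true ↔
      (0 ≤ c.1 ∧ c.1 < m ∧ 0 ≤ c.2 ∧ c.2 < n ∧ cellG 0 board c.1 c.2 = 1)) :
    ∀ (fuel : Nat) (q : List (Int × Int)) (v : List (List Bool))
      (V : Finset (Int × Int)) (a : Int),
      GridRel m n v V →
      GridRel m n (bfsLoop m n board fuel q v a).1 (gloop free popHead fuel q V a).1 ∧
      (bfsLoop m n board fuel q v a).2 = (gloop free popHead fuel q V a).2 := by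
  intro fuel
  induction fuel with
  | zero =>
      intro q v V a h
      simp only [bfsLoop, gloop]
      exact ⟨h, by trivial⟩
  | succ fuel ih =>
      intro q v V a h
      cases q with
      | nil =>
          simp only [bfsLoop, gloop, popHead]
          exact ⟨h, by trivial⟩
      | cons c rest =>
          obtain ⟨x, y⟩ := c
          have hmap : pyDirections.map (fun d => (x + d.1, y + d.2)) = nbrs (x, y) := by
            simp only [pyDirections, nbrs, List.map]
            norm_num
            omega
          have hA : pyDirections.foldl
              (fun (st : List (List Bool) × List (Int × Int)) d =>
                let nx := x + d.1
                let ny := y + d.2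
                if 0 ≤ nx ∧ nx < m ∧ 0 ≤ ny ∧ ny < n ∧
                   cellG false st.1 nx ny = false ∧ cellG 0 board nx ny = 1 then
                  (setG st.1 nx ny true, st.2 ++ [(nx, ny)])
                else st) (v, rest)
              = (nbrs (x, y)).foldl (stepA m n board) (v, rest) := by
            rw [← hmap, List.foldl_map]
            rfl
          simp only [bfsLoop, gloop, popHead, hA]
          obtain ⟨h1, h2⟩ := foldAG m n board free hfree (nbrs (x, y)) v V rest h
          rw [h2]
          exact ih _ _ _ _ h1

-- ===== simulation of port B's DFS loop by the abstract worklist loop =====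
def ListSetRel (vs : List (Int × Int)) (V : Finset (Int × Int)) : Prop :=
  vs.Nodup ∧ vs.toFinset = V

theorem Set_add_of_not_mem {vs : List (Int × Int)} {e : Int × Int} (h : e ∉ vs) :
    PySem.Set.add vs e = vs ++ [e] := by
  simp only [PySem.Set.add]
  split_ifs with hc
  · exact absurd ((PySem.Set.contains_iff _ _).1 hc) h
  · rfl

theorem ListSetRel_insert {vs : List (Int × Int)} {V : Finset (Int × Int)}
    (h : ListSetRel vs V) {e : Int × Int} (he : e ∉ V) :
    ListSetRel (PySem.Set.add vs e) (insert e V) := by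
  have hev : e ∉ vs := fun hh => he (h.2 ▸ List.mem_toFinset.2 hh)
  rw [Set_add_of_not_mem hev]
  constructor
  · refine List.Nodup.append h.1 (by simp) ?_
    rw [List.disjoint_left]
    intro x hx hxe
    rw [List.mem_singleton] at hxe
    exact hev (hxe ▸ hx)
  · ext x
    simp only [List.toFinset_append, Finset.mem_union, List.mem_toFinset,
      List.mem_singleton, Finset.mem_insert, ← h.2, List.mem_toFinset]
    tauto

def stepB (m n : Int) (cover : List (List Int))
    (st : List (Int × Int) × List (Int × Int)) (e : Int × Int) :
    List (Int × Int) × List (Int × Int) :=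
  if 0 ≤ e.1 ∧ e.1 < m ∧ 0 ≤ e.2 ∧ e.2 < n ∧ e ∉ st.1 ∧
     cellG 0 cover e.1 e.2 = 0 then
    (PySem.Set.add st.1 e, st.2 ++ [e])
  else st

theorem foldBG (m n : Int) (cover : List (List Int)) (free : Int × Int → Bool)
    (hfree : ∀ c : Int × Int, free c = true ↔
      (0 ≤ c.1 ∧ c.1 < m ∧ 0 ≤ c.2 ∧ c.2 < n ∧ cellG 0 cover c.1 c.2 = 0)) :
    ∀ (ds : List (Int × Int)) (vs : List (Int × Int)) (V : Finset (Int × Int))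
      (W : List (Int × Int)),
      ListSetRel vs V →
      ListSetRel (ds.foldl (stepB m n cover) (vs, W)).1
        ((ds.foldl (stepG free) (V, W)).1) ∧
      (ds.foldl (stepB m n cover) (vs, W)).2 = (ds.foldl (stepG free) (V, W)).2 := by
  intro ds
  induction ds with
  | nil => intro vs V W h; exact ⟨h, rfl⟩
  | cons d ds ih =>
      intro vs V W h
      have hmemd : d ∈ vs ↔ d ∈ V := by
        rw [← h.2, List.mem_toFinset]
      have hiff : (0 ≤ d.1 ∧ d.1 < m ∧ 0 ≤ d.2 ∧ d.2 < n ∧ d ∉ vs ∧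
          cellG 0 cover d.1 d.2 = 0) ↔ (free d = true ∧ d ∉ V) := by
        rw [hfree, ← hmemd]
        tauto
      simp only [List.foldl_cons]
      by_cases hc : free d = true ∧ d ∉ V
      · have hcB := hiff.2 hc
        rw [show stepB m n cover (vs, W) d = (PySem.Set.add vs d, W ++ [d]) from by
              simp only [stepB, if_pos hcB],
            show stepG free (V, W) d = (insert d V, W ++ [d]) from by
              simp only [stepG, if_pos hc]]
        exact ih _ _ _ (ListSetRel_insert h hc.2)
      · have hcB : ¬ (0 ≤ d.1 ∧ d.1 < m ∧ 0 ≤ d.2 ∧ d.2 < n ∧ d ∉ vs ∧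
            cellG 0 cover d.1 d.2 = 0) := fun hh => hc (hiff.1 hh)
        rw [show stepB m n cover (vs, W) d = (vs, W) from by simp only [stepB, if_neg hcB],
            show stepG free (V, W) d = (V, W) from by simp only [stepG, if_neg hc]]
        exact ih _ _ _ h

theorem simB (m n : Int) (cover : List (List Int)) (free : Int × Int → Bool)
    (hfree : ∀ c : Int × Int, free c = true ↔
      (0 ≤ c.1 ∧ c.1 < m ∧ 0 ≤ c.2 ∧ c.2 < n ∧ cellG 0 cover c.1 c.2 = 0)) :
    ∀ (fuel : Nat) (q : List (Int × Int)) (vs : List (Int × Int))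
      (V : Finset (Int × Int)) (a : Int),
      ListSetRel vs V →
      ListSetRel (areaLoop m n cover fuel q vs a).1 (gloop free popLast fuel q V a).1 ∧
      (areaLoop m n cover fuel q vs a).2 = (gloop free popLast fuel q V a).2 := by
  intro fuel
  induction fuel with
  | zero =>
      intro q vs V a h
      simp only [areaLoop, gloop]
      exact ⟨h, by trivial⟩
  | succ fuel ih =>
      intro q vs V a h
      cases hq : q.getLast? with
      | none =>
          simp only [areaLoop, gloop, popLast, hq]
          exact ⟨h, by trivial⟩
      | some c =>
          have hB : [(c.1 + 1, c.2), (c.1, c.2 + 1), (c.1 - 1, c.2), (c.1, c.2 - 1)].foldl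
              (fun (st : List (Int × Int) × List (Int × Int)) e =>
                if 0 ≤ e.1 ∧ e.1 < m ∧ 0 ≤ e.2 ∧ e.2 < n ∧ e ∉ st.1 ∧
                   cellG 0 cover e.1 e.2 = 0 then
                  (PySem.Set.add st.1 e, st.2 ++ [e])
                else st) (vs, q.dropLast)
              = (nbrs c).foldl (stepB m n cover) (vs, q.dropLast) := rfl
          simp only [areaLoop, gloop, popLast, hq, hB]
          obtain ⟨h1, h2⟩ := foldBG m n cover free hfree (nbrs c) vs V q.dropLast h
          rw [h2]
          exact ih _ _ _ _ h1

-- ===== the in-bounds grid as a Finset, for the fuel bound =====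
noncomputable def gridFS (m n : Int) : Finset (Int × Int) :=
  Finset.Icc 0 (m - 1) ×ˢ Finset.Icc 0 (n - 1)

theorem mem_gridFS {m n : Int} {c : Int × Int} :
    c ∈ gridFS m n ↔ 0 ≤ c.1 ∧ c.1 < m ∧ 0 ≤ c.2 ∧ c.2 < n := by
  unfold gridFS
  rw [Finset.mem_product, Finset.mem_Icc, Finset.mem_Icc]
  omega

theorem card_gridFS (m n : Int) : (gridFS m n).card = m.toNat * n.toNat := by
  unfold gridFS
  rw [Finset.card_product, Int.card_Icc, Int.card_Icc]
  congr 1 <;> omega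

-- ===== one region fill: A's BFS and B's DFS agree =====
theorem fill_eq (m n : Int) (board cover : List (List Int)) (free : Int × Int → Bool)
    (hfA : ∀ c : Int × Int, free c = true ↔
      (0 ≤ c.1 ∧ c.1 < m ∧ 0 ≤ c.2 ∧ c.2 < n ∧ cellG 0 board c.1 c.2 = 1))
    (hfB : ∀ c : Int × Int, free c = true ↔
      (0 ≤ c.1 ∧ c.1 < m ∧ 0 ≤ c.2 ∧ c.2 < n ∧ cellG 0 cover c.1 c.2 = 0))
    (v : List (List Bool)) (vs : List (Int × Int)) (V : Finset (Int × Int))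
    (hA : GridRel m n v V) (hB : ListSetRel vs V) (s : Int × Int)
    (hs : 0 ≤ s.1 ∧ s.1 < m ∧ 0 ≤ s.2 ∧ s.2 < n) (hsV : s ∉ V) :
    (bfsA m n board v s).2 = (areaB m n cover vs s.1 s.2).2 ∧
    ∃ V', GridRel m n (bfsA m n board v s).1 V' ∧
      ListSetRel (areaB m n cover vs s.1 s.2).1 V' := by
  have hA1 : GridRel m n (setG v s.1 s.2 true) (insert s V) := GridRel_insert hA hs
  have hB1 : ListSetRel (PySem.Set.add vs s) (insert s V) := ListSetRel_insert hB hsV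
  have hpopsH : ∀ (W : List (Int × Int)), W ≠ [] →
      ∃ c rest, popHead W = some (c, rest) ∧ W.Perm (c :: rest) := by
    intro W hW
    cases W with
    | nil => exact absurd rfl hW
    | cons c rest => exact ⟨c, rest, rfl, List.Perm.refl _⟩
  have hpopsL : ∀ (W : List (Int × Int)), W ≠ [] →
      ∃ c rest, popLast W = some (c, rest) ∧ W.Perm (c :: rest) := by
    intro W hW
    have hlast : W.getLast? = some (W.getLast hW) := List.getLast?_eq_some_getLast hW
    refine ⟨W.getLast hW, W.dropLast, by simp [popLast, hlast], ?_⟩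
    have h1 : W.dropLast ++ [W.getLast hW] = W := List.dropLast_append_getLast hW
    have h2 : (W.dropLast ++ [W.getLast hW]).Perm (W.getLast hW :: W.dropLast) :=
      List.perm_append_singleton _ _
    have h3 := h2
    rw [h1] at h3
    exact h3
  set U := insert s (gridFS m n) with hU
  have hfreeU : ∀ c, free c = true → c ∈ U := by
    intro c hc
    rw [hfA] at hc
    exact Finset.mem_insert_of_mem (mem_gridFS.2 ⟨hc.1, hc.2.1, hc.2.2.1, hc.2.2.2.1⟩)
  set RS := reachSet free (insert s V) [s] U with hRS
  have hsRS : s ∈ RS := by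
    rw [hRS]
    exact mem_reachSet.2 ⟨Finset.mem_insert_self _ _, Reach.base (by simp)⟩
  have hinit : ∀ (pop : List (Int × Int) → Option ((Int × Int) × List (Int × Int))),
      pop [] = none →
      (∀ (W : List (Int × Int)), W ≠ [] →
        ∃ c rest, pop W = some (c, rest) ∧ W.Perm (c :: rest)) →
      gloop free pop (m.toNat * n.toNat + 1) [s] (insert s V) 0
        = (insert s V ∪ RS, 0 + ((RS).card : Int)) := by
    intro pop hn hp
    apply gloop_run free pop hn hp (insert s V) [s] U hfreeU 0
      (m.toNat * n.toNat + 1) [s] (insert s V) ∅ 0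
    · simp
    · ext x
      simp only [Finset.mem_union, Finset.mem_insert, List.toFinset_cons,
        List.toFinset_nil, insert_empty_eq, Finset.notMem_empty, Finset.mem_singleton]
      tauto
    · intro c hc
      rw [List.mem_singleton] at hc
      exact Or.inr (by simp [hc])
    · intro c hc
      exact absurd hc (Finset.notMem_empty c)
    · intro c hc
      rw [List.mem_singleton] at hc
      subst hc
      exact hsRS
    · intro c hc
      exact absurd hc (Finset.notMem_empty c)
    · intro c hc
      exact absurd hc (Finset.notMem_empty c)
    · simp
    · have hsub : RS \ insert s V ⊆ gridFS m n := by
        intro x hx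
        obtain ⟨hx1, hx2⟩ := Finset.mem_sdiff.1 hx
        have hxU : x ∈ U := (mem_reachSet.1 (hRS ▸ hx1)).1
        rcases Finset.mem_insert.1 hxU with h | h
        · exact absurd (h ▸ Finset.mem_insert_self s V) hx2
        · exact h
      have := Finset.card_le_card hsub
      rw [card_gridFS] at this
      rw [hRS] at this
      simp only [List.length_singleton]
      omega
  have hGA := hinit popHead rfl hpopsH
  have hGB := hinit popLast rfl hpopsL
  obtain ⟨hA2, hA3⟩ := simA m n board free hfA (m.toNat * n.toNat + 1) [s]
    (setG v s.1 s.2 true) (insert s V) 0 hA1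
  have hsmk : ((s.1, s.2) : Int × Int) = s := rfl
  obtain ⟨hB2, hB3⟩ := simB m n cover free hfB (m.toNat * n.toNat + 1) [s]
    (PySem.Set.add vs s) (insert s V) 0 hB1
  constructor
  · show (bfsLoop m n board (m.toNat * n.toNat + 1) [s] (setG v s.1 s.2 true) 0).2
      = (areaLoop m n cover (m.toNat * n.toNat + 1) [(s.1, s.2)] (PySem.Set.add vs (s.1, s.2)) 0).2
    rw [hsmk, hA3, hB3, hGA, hGB]
  · refine ⟨insert s V ∪ RS, ?_, ?_⟩
    · show GridRel m n (bfsLoop m n board (m.toNat * n.toNat + 1) [s] (setG v s.1 s.2 true) 0).1 _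
      rw [hGA] at hA2
      exact hA2
    · show ListSetRel (areaLoop m n cover (m.toNat * n.toNat + 1) [(s.1, s.2)] (PySem.Set.add vs (s.1, s.2)) 0).1 _
      rw [hsmk]
      rw [hGB] at hB2
      exact hB2

-- ===== relational fold, and the region scan =====
theorem foldl_rel {α β γ : Type} (R : α → β → Prop) (f : α → γ → α) (g : β → γ → β) :
    ∀ (l : List γ) (a : α) (b : β), R a b →
      (∀ x ∈ l, ∀ a b, R a b → R (f a x) (g b x)) →
      R (l.foldl f a) (l.foldl g b) := by
  intro l
  induction l with
  | nil => intro a b h _; exact h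
  | cons x l ih =>
      intro a b h hstep
      exact ih _ _ (hstep x (by simp) a b h) (fun y hy => hstep y (by simp [hy]))

theorem scan_out_eq (m n : Int) (hm : 0 ≤ m) (board cover : List (List Int))
    (H : ∀ x y : Int, 0 ≤ x → x < m → 0 ≤ y → y < n →
      (cellG 0 board x y = 1 ↔ cellG 0 cover x y = 0)) :
    ((PySem.List.pyRange 0 m 1).foldl
      (fun (st : List (List Bool) × List Int) x =>
        (PySem.List.pyRange 0 n 1).foldl (fun st y =>
          if cellG 0 board x y = 1 ∧ cellG false st.1 x y = false then
            ((bfsA m n board st.1 (x, y)).1, st.2 ++ [(bfsA m n board st.1 (x, y)).2])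
          else st) st)
      ((PySem.List.pyRange 0 m 1).map (fun _ => List.replicate n.toNat false),
        ([] : List Int))).2
    = ((PySem.List.pyRange 0 m 1).foldl
      (fun (st : List (Int × Int) × List Int) x =>
        (PySem.List.pyRange 0 n 1).foldl (fun st y =>
          if cellG 0 cover x y = 0 ∧ (x, y) ∉ st.1 then
            ((areaB m n cover st.1 x y).1, st.2 ++ [(areaB m n cover st.1 x y).2])
          else st) st)
      (([] : List (Int × Int)), ([] : List Int))).2 := by
  set free : Int × Int → Bool := fun c =>
    decide (0 ≤ c.1 ∧ c.1 < m ∧ 0 ≤ c.2 ∧ c.2 < n ∧ cellG 0 board c.1 c.2 = 1) with hfree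
  have hfA : ∀ c : Int × Int, free c = true ↔
      (0 ≤ c.1 ∧ c.1 < m ∧ 0 ≤ c.2 ∧ c.2 < n ∧ cellG 0 board c.1 c.2 = 1) := by
    intro c
    simp [hfree]
  have hfB : ∀ c : Int × Int, free c = true ↔
      (0 ≤ c.1 ∧ c.1 < m ∧ 0 ≤ c.2 ∧ c.2 < n ∧ cellG 0 cover c.1 c.2 = 0) := by
    intro c
    rw [hfA]
    constructor
    · rintro ⟨a1, a2, a3, a4, a5⟩
      exact ⟨a1, a2, a3, a4, (H c.1 c.2 a1 a2 a3 a4).1 a5⟩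
    · rintro ⟨a1, a2, a3, a4, a5⟩
      exact ⟨a1, a2, a3, a4, (H c.1 c.2 a1 a2 a3 a4).2 a5⟩
  refine (foldl_rel
    (fun (stA : List (List Bool) × List Int) (stB : List (Int × Int) × List Int) =>
      stA.2 = stB.2 ∧ ∃ V, GridRel m n stA.1 V ∧ ListSetRel stB.1 V)
    _ _ (PySem.List.pyRange 0 m 1) _ _ ?_ ?_).1
  · constructor
    · rfl
    · refine ⟨∅, ⟨shape_init false m n.toNat hm, ?_, ?_⟩, by simp [ListSetRel]⟩
      · intro c hc1 hc2 hc3 hc4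
        rw [cellG_init false false m n.toNat c.1 c.2 hc1 hc2 hc3 (by omega)]
        simp
      · intro c hc
        exact absurd hc (Finset.notMem_empty c)
  · intro x hx stA stB hst
    rw [PySem.List.mem_pyRange_one] at hx
    refine foldl_rel
      (fun (stA : List (List Bool) × List Int) (stB : List (Int × Int) × List Int) =>
        stA.2 = stB.2 ∧ ∃ V, GridRel m n stA.1 V ∧ ListSetRel stB.1 V)
      _ _ (PySem.List.pyRange 0 n 1) stA stB hst ?_
    intro y hy stA' stB' hst'
    rw [PySem.List.mem_pyRange_one] at hy
    obtain ⟨h2, V, hGA, hGB⟩ := hst'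
    have hmemb : ((x, y) : Int × Int) ∈ stB'.1 ↔ (x, y) ∈ V := by
      rw [← hGB.2, List.mem_toFinset]
    have hiff : (cellG 0 board x y = 1 ∧ cellG false stA'.1 x y = false)
        ↔ (cellG 0 cover x y = 0 ∧ ((x, y) : Int × Int) ∉ stB'.1) := by
      rw [H x y hx.1 hx.2 hy.1 hy.2, hmemb]
      have hrd := hGA.2.1 (x, y) hx.1 hx.2 hy.1 hy.2
      constructor
      · rintro ⟨a1, a2⟩
        refine ⟨a1, fun hv => ?_⟩
        rw [← hrd] at hv
        rw [a2] at hv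
        exact Bool.false_ne_true hv
      · rintro ⟨a1, a2⟩
        refine ⟨a1, ?_⟩
        rcases Bool.eq_false_or_eq_true (cellG false stA'.1 x y) with hb | hb
        · exact absurd (hrd.1 hb) a2
        · exact hb
    by_cases hc : cellG 0 cover x y = 0 ∧ ((x, y) : Int × Int) ∉ stB'.1
    · rw [if_pos (hiff.2 hc), if_pos hc]
      have hsV : ((x, y) : Int × Int) ∉ V := fun hv => hc.2 (hmemb.2 hv)
      obtain ⟨heq, V', hGA', hGB'⟩ := fill_eq m n board cover free hfA hfB
        stA'.1 stB'.1 V hGA hGB (x, y) ⟨hx.1, hx.2, hy.1, hy.2⟩ hsV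
      exact ⟨by rw [h2, heq], V', hGA', hGB'⟩
    · rw [if_neg (fun hh => hc (hiff.1 hh)), if_neg hc]
      exact ⟨h2, V, hGA, hGB⟩

-- ===== VERDICT (by name: the statement is the Claim_ definition above) =====
theorem solve_spec : Claim_equal_solve := by
  unfold Claim_equal_solve
  intro m n rects hdom hpre
  unfold Pre_solve at hpre
  have hR' : ∀ r ∈ rects, rectOK m n r := by
    intro r hrr
    unfold rectOK
    exact hpre r hrr
  unfold Spec_solve
  by_cases hm : 0 ≤ m
  · simp only [solve, solve_alt]
    rw [scan_out_eq m n hm]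
    intro a b ha ha2 hb hb2
    obtain ⟨hsb, hcb⟩ := markAll_spec m n rects _ (shape_init (1 : Int) m n.toNat hm) hR'
    rw [hcb a b ha hb, cellG_init 0 1 m n.toNat a b ha ha2 hb (by omega)]
    rw [cover_cell m n _ a b ha ha2 hb hb2]
    obtain ⟨hsm, hcm⟩ := marksAll_spec m n rects _ (shape_init (0 : Int) m (n + 1).toNat hm) hR'
    rw [cover_count m n rects hR' _ (fun a j ha ha2 hj hj2 => by
      rw [hcm a j ha hj, cellG_init 0 0 m (n + 1).toNat a j ha ha2 hj (by omega)]
      ring) a b ha ha2 hb hb2]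
    by_cases hany : rects.any (coversb a b) = true
    · have hne : rects.countP (fun r => coversb a b r) ≠ 0 := by
        rcases List.any_eq_true.1 hany with ⟨r, hr, hp⟩
        have hpos : 0 < rects.countP (fun r => coversb a b r) :=
          List.countP_pos_iff.2 ⟨r, hr, hp⟩
        omega
      simp [hany, Int.natCast_eq_zero, hne]
    · have h0 : rects.countP (fun r => coversb a b r) = 0 := by
        rw [List.countP_eq_zero]
        intro r hr
        exact fun hp => hany (List.any_eq_true.2 ⟨r, hr, hp⟩)
      simp [hany, h0]
  · simp [solve, solve_alt, PySem.List.pyRange_one_eq_nil (show m ≤ 0 by omega)]
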